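-- pv_equiv track=rewrite | github.com/neumannjan/nn-structural-graph-vectorizer-compiler | lib/nn/topological/layer.py | _assert_all_same_ignore_none
-- ===== SOURCE A (Python) =====
-- from collections.abc import Iterable
-- from typing import Collection, Mapping, TypeGuard, TypeVar
--
-- _T = TypeVar("_T")
--
-- def _assert_all_same_ignore_none(what_plural: str, source: Iterable[_T]) -> _T | None:
--     first = None
--
--     for v in source:
--         if v is None:
--             continue
--
--         if first is None:
--             first = v
--             continue
--
--         assert first == v, f"Assertion failed: found {what_plural} {first} and {v}"
--
--     return first
-- ===== SOURCE B (Python) =====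
-- def _assert_all_same_ignore_none(what_plural, source):
--     distinct = list(dict.fromkeys(v for v in source if v is not None))
--     assert len(distinct) <= 1, \
--         f"Assertion failed: found {what_plural} {distinct[0]} and {distinct[1]}"
--     return distinct[0] if distinct else None
-- ===== Notes on version B (the rewrite author's own statement) =====
-- stated objective: alternative
-- what changed: B builds the ordered set of distinct non-None values with dict.fromkeys and asserts its cardinality is at most 1, replacing A's stateful compare-each-to-first loop; the returned value is the head of that dedup list (first occurrences, so the assertion message pair matches A's).
import Mathlib
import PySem

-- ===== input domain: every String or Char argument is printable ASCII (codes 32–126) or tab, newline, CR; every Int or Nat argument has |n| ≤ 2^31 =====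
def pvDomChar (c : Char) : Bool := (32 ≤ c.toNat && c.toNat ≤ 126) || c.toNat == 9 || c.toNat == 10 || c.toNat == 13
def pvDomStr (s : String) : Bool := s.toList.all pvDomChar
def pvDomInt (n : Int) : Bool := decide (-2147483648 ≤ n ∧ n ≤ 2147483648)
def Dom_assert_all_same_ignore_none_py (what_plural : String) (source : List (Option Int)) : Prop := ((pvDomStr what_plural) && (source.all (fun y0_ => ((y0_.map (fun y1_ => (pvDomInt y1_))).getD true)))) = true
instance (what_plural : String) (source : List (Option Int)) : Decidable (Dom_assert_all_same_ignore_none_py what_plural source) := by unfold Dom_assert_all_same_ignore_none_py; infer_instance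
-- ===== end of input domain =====

-- B change (objective: alternative): B dedups the non-None values into an ordered set
-- (dict.fromkeys) and asserts its cardinality is at most 1, instead of A's compare-each-to-first loop.

-- ===== PORT A =====
-- A: loop over source keeping `first`; skip None; set first on first non-None; assert equality after.
-- The assert raises outside Pre_ (excluded); inside Pre_ the branch keeps `first`.
def assert_all_same_ignore_none_py (what_plural : String) (source : List (Option Int)) : Option Int :=
  source.foldl (fun first v =>
    match v with
    | none => first                 -- if v is None: continue
    | some x =>
      match first with
      | none => some x              -- if first is None: first = v
      | some f => some f) none      -- assert first == v (raises outside Pre_), first unchanged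

-- ===== PORT B =====
-- B: distinct = list(dict.fromkeys(v for v in source if v is not None));
-- assert len(distinct) <= 1 (raises outside Pre_); return distinct[0] if distinct else None.
def assert_all_same_ignore_none_py_alt (what_plural : String) (source : List (Option Int)) : Option Int :=
  let distinct := PySem.List.dedup (source.filterMap id)
  -- assert len(distinct) <= 1: raises outside Pre_, computes nothing here
  match distinct with
  | [] => none
  | f :: _ => some f

-- ===== PRECONDITION & SPEC =====
-- Pre_ excludes exactly the inputs with two different non-None values, on which the
-- Python A (and B) raise AssertionError instead of returning.
def Pre_assert_all_same_ignore_none_py (what_plural : String) (source : List (Option Int)) : Prop :=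
  ∀ a ∈ source.filterMap id, ∀ b ∈ source.filterMap id, a = b
instance (what_plural : String) (source : List (Option Int)) : Decidable (Pre_assert_all_same_ignore_none_py what_plural source) := by unfold Pre_assert_all_same_ignore_none_py; infer_instance

def pvWitness_assert_all_same_ignore_none_py : String × List (Option Int) := ("values", [none, some 3, none, some 3])

def Spec_assert_all_same_ignore_none_py (what_plural : String) (source : List (Option Int)) (out : Option Int) : Prop := out = assert_all_same_ignore_none_py_alt what_plural source
instance (what_plural : String) (source : List (Option Int)) (out : Option Int) : Decidable (Spec_assert_all_same_ignore_none_py what_plural source out) := by unfold Spec_assert_all_same_ignore_none_py; infer_instance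

-- ===== CLAIM (what is proved, stated in full; the proofs are below) =====
def Claim_equal_assert_all_same_ignore_none_py : Prop := ∀ (what_plural : String) (source : List (Option Int)), Dom_assert_all_same_ignore_none_py what_plural source → Pre_assert_all_same_ignore_none_py what_plural source → Spec_assert_all_same_ignore_none_py what_plural source (assert_all_same_ignore_none_py what_plural source)

-- ===== LEMMAS AND PROOFS =====
-- A's fold, started from any accumulator, returns the accumulator if set, else the first non-None.
theorem pv_foldl_first (source : List (Option Int)) :
    ∀ acc : Option Int,
      source.foldl (fun first v =>
        match v with
        | none => first
        | some x => match first with | none => some x | some f => some f) acc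
      = (match acc with
         | some a => some a
         | none => (source.filterMap id).head?) := by
  induction source with
  | nil => intro acc; cases acc <;> simp
  | cons h t ih =>
    intro acc
    cases acc <;> cases h <;> simp [List.foldl, ih]

-- folding Set.add never changes the head of a nonempty accumulator
theorem pv_foldl_add_head? (t : List Int) : ∀ acc : List Int, acc ≠ [] →
    (t.foldl PySem.Set.add acc).head? = acc.head? := by
  induction t with
  | nil => intro acc _; rfl
  | cons x t ih =>
    intro acc hacc
    simp only [List.foldl]
    rw [PySem.Set.add_eq_ite]
    split
    · exact ih acc hacc
    · rw [ih (acc ++ [x]) (by simp)]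
      cases acc with
      | nil => exact absurd rfl hacc
      | cons a t' => rfl

-- dedup keeps first occurrences, so its head is the list's head
theorem pv_dedup_head? (xs : List Int) : (PySem.List.dedup xs).head? = xs.head? := by
  cases xs with
  | nil => rfl
  | cons x t =>
    rw [PySem.List.dedup_eq_ofList, PySem.Set.ofList_eq_foldl]
    simp only [List.foldl]
    rw [show PySem.Set.add [] x = [x] from rfl]
    exact pv_foldl_add_head? t [x] (by simp)

-- ===== VERDICT (by name: the statement is the Claim_ definition above) =====
theorem assert_all_same_ignore_none_py_spec : Claim_equal_assert_all_same_ignore_none_py := by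
  intro what_plural source _hDom _hPre
  unfold Spec_assert_all_same_ignore_none_py
  unfold assert_all_same_ignore_none_py assert_all_same_ignore_none_py_alt
  rw [pv_foldl_first, ← pv_dedup_head? (source.filterMap id)]
  cases PySem.List.dedup (source.filterMap id) <;> rfl
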